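-- pv_equiv track=rewrite | github.com/junyeongh/cityu-courses | cs4335-2425a/assignment2-2.py | max_weight_independent_set
-- ===== SOURCE A (Python) =====
-- def max_weight_independent_set(weights, distances, L):
--     n = len(weights)
--
--     # dp[i][j] represents max weight considering nodes 1..i
--     # where j is index of last included node (0 if none)
--     dp = [[0] * (n + 1) for _ in range(n + 1)]
--
--     # For tracking the solution
--     prev = [[0] * (n + 1) for _ in range(n + 1)]
--
--     # Base case: considering only first node
--     dp[1][0] = 0  # don't include it
--     dp[1][1] = weights[0]  # include it
--
--     # For each node i
--     for i in range(2, n + 1):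
--         # For each possible last included node j
--         for j in range(i):
--             # Don't include node i
--             dp[i][j] = dp[i - 1][j]
--             prev[i][j] = j
--
--             # Try to include node i if possible
--             can_include = True
--
--             # If we had included a node before (j > 0)
--             if j > 0:
--                 # Calculate distance from j to i
--                 dist = sum(distances[k] for k in range(j - 1, i - 1))
--                 if dist < L:
--                     can_include = False
--
--             if can_include:
--                 # Check if including i gives better result
--                 new_weight = dp[i - 1][j] + weights[i - 1]
--                 if new_weight > dp[i][i]:
--                     dp[i][i] = new_weight
--                     prev[i][i] = j
--
--     # Find maximum in last row
--     max_weight = 0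
--     last_included = 0
--     for j in range(n + 1):
--         if dp[n][j] > max_weight:
--             max_weight = dp[n][j]
--             last_included = j
--
--     # Reconstruct solution
--     solution = []
--     i = n
--     while i > 0:
--         if i == last_included:
--             solution.append(i)
--             last_included = prev[i][last_included]
--         i -= 1
--
--     from pprint import pprint
--     pprint(dp)
--     return max_weight, solution[::-1]
-- ===== SOURCE B (Python) =====
-- def max_weight_independent_set(weights, distances, L):
--     n = len(weights)
--     # prefix sums: pref[m] = distances[0] + ... + distances[m-1], so each gap is O(1)
--     pref = [0]
--     running = 0
--     for d in distances[:max(n - 1, 0)]: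
--         running += d
--         pref.append(running)
--     # f[i] = best weight of a chain considered up to node i with i as last kept node
--     # (f[1] is node 1's own weight, as in the base case); par[i] = previous kept node (0 = none)
--     f = [0]
--     par = [0]
--     if n >= 1:
--         f.append(weights[0])
--         par.append(0)
--     for i in range(2, n + 1):
--         best = 0
--         arg = 0
--         for j in range(i):
--             if j == 0 or pref[i - 1] - pref[j - 1] >= L:
--                 cand = f[j] + weights[i - 1]
--                 if cand > best:
--                     best = cand
--                     arg = j
--         f.append(best)
--         par.append(arg)
--     max_weight = 0
--     last = 0
--     for j in range(1, n + 1):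
--         if f[j] > max_weight:
--             max_weight = f[j]
--             last = j
--     chain = []
--     while last > 0:
--         chain.append(last)
--         last = par[last]
--     return max_weight, chain[::-1]
-- ===== Notes on version B (the rewrite author's own statement) =====
-- stated objective: faster
-- what changed: Replaces the (n+1)x(n+1) DP tables and the per-pair re-summation of distances by a 1-D DP over 'best chain ending at i' with precomputed prefix sums of distances, so each gap test is O(1); B also drops A's pprint debug output (return-value equivalence only).
import Mathlib
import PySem

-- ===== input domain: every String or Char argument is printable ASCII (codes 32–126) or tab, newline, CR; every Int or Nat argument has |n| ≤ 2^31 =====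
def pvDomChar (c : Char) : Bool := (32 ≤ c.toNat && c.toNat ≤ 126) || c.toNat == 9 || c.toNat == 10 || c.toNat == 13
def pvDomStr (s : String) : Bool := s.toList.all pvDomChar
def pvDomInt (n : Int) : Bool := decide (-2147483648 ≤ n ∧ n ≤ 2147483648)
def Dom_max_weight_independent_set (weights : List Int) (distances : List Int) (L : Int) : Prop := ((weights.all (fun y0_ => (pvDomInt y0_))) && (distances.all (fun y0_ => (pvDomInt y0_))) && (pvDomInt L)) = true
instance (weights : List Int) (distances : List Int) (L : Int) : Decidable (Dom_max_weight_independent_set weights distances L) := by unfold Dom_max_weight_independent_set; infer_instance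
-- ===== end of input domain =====

-- B replaces A's two-dimensional DP tables (which re-sum the distance gap for every pair)
-- by a one-dimensional DP over "best chain ending at node i" with precomputed prefix sums of
-- the distances, so each gap test is a single subtraction.  A also pretty-prints its DP table;
-- B omits that debug output, so the equivalence proved here is about the RETURN value only.

-- ===== PORT A =====
-- Python's list-of-list tables dp / prev (all zero-initialised, written by index assignment)
-- are ported as total functions with pointwise update; this is exact for the in-range
-- assignments A performs.
def pvUpdI (f : Nat → Nat → Int) (a b : Nat) (v : Int) : Nat → Nat → Int :=
  fun x y => if x = a ∧ y = b then v else f x y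

def pvUpdN (f : Nat → Nat → Nat) (a b : Nat) (v : Nat) : Nat → Nat → Nat :=
  fun x y => if x = a ∧ y = b then v else f x y

def max_weight_independent_set (weights : List Int) (distances : List Int) (L : Int) : Int × List Int :=
  let n := weights.length
  let dp0 : Nat → Nat → Int := fun _ _ => 0
  let prev0 : Nat → Nat → Nat := fun _ _ => 0
  -- dp[1][0] = 0 already holds; dp[1][1] = weights[0]  (in range on Pre_, getD is exact there)
  let dpA := pvUpdI dp0 1 1 (weights.getD 0 0)
  -- for i in range(2, n + 1): for j in range(i): ...
  let st2 := (List.range' 2 (n - 1)).foldl (fun st i =>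
      (List.range i).foldl (fun (st : (Nat → Nat → Int) × (Nat → Nat → Nat)) j =>
        let dp := pvUpdI st.1 i j (st.1 (i - 1) j)
        let prev := pvUpdN st.2 i j j
        -- dist = sum(distances[k] for k in range(j - 1, i - 1)); in range on Pre_
        let can_include : Bool :=
          if 0 < j then
            !(decide ((List.range' (j - 1) (i - j)).foldl (fun s k => s + distances.getD k 0) 0 < L))
          else true
        if can_include then
          let nw := dp (i - 1) j + weights.getD (i - 1) 0
          if dp i i < nw then (pvUpdI dp i i nw, pvUpdN prev i i j) else (dp, prev)
        else (dp, prev)) st) (dpA, prev0)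
  let dp := st2.1
  let prev := st2.2
  -- max over last row (strict improvement keeps the first maximiser)
  let mw := (List.range (n + 1)).foldl (fun (st : Int × Nat) j =>
      if st.1 < dp n j then (dp n j, j) else st) (0, 0)
  -- while i > 0: if i == last_included: solution.append(i); last = prev[i][last]
  let rec0 := (List.range' 1 n).reverse.foldl (fun (st : List Int × Nat) i =>
      if i = st.2 then (st.1 ++ [(i : Int)], prev i st.2) else st) ([], mw.2)
  (mw.1, rec0.1.reverse)

-- ===== PORT B =====
-- Python while-loop of Source B ported with fuel; fuel n + 1 suffices since par[last] < last.
def pvChainAux (par : List Nat) : Nat → Nat → List Int → List Int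
  | 0, _, acc => acc
  | fuel + 1, last, acc =>
      if last = 0 then acc else pvChainAux par fuel (par.getD last 0) (acc ++ [(last : Int)])

def max_weight_independent_set_alt (weights : List Int) (distances : List Int) (L : Int) : Int × List Int :=
  let n := weights.length
  -- prefix sums: pref[m] = distances[0] + ... + distances[m-1]
  let pr := (distances.take (n - 1)).foldl
      (fun (st : List Int × Int) d => (st.1 ++ [st.2 + d], st.2 + d)) ([0], 0)
  let pref := pr.1
  let fp0 : List Int × List Nat := if 1 ≤ n then ([0, weights.getD 0 0], [0, 0]) else ([0], [0])
  let fp := (List.range' 2 (n - 1)).foldl (fun (fp : List Int × List Nat) i =>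
      let ba := (List.range i).foldl (fun (ba : Int × Nat) j =>
          if j = 0 ∨ L ≤ pref.getD (i - 1) 0 - pref.getD (j - 1) 0 then
            let cand := fp.1.getD j 0 + weights.getD (i - 1) 0
            if ba.1 < cand then (cand, j) else ba
          else ba) (0, 0)
      (fp.1 ++ [ba.1], fp.2 ++ [ba.2])) fp0
  let mw := (List.range' 1 n).foldl (fun (st : Int × Nat) j =>
      if st.1 < fp.1.getD j 0 then (fp.1.getD j 0, j) else st) (0, 0)
  (mw.1, (pvChainAux fp.2 (n + 1) mw.2 []).reverse)

-- ===== PRECONDITION & SPEC =====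
-- Pre_ excludes exactly the inputs where A raises IndexError: an empty weights list
-- (dp[1][0] out of range) and distances shorter than len(weights) - 1 (the gap sum
-- indexes distances[n-2]).
def Pre_max_weight_independent_set (weights : List Int) (distances : List Int) (L : Int) : Prop :=
  1 ≤ weights.length ∧ weights.length ≤ distances.length + 1

instance (weights : List Int) (distances : List Int) (L : Int) : Decidable (Pre_max_weight_independent_set weights distances L) := by unfold Pre_max_weight_independent_set; infer_instance

def pvWitness_max_weight_independent_set : List Int × List Int × Int := ([2, 3, 4], ([1, 5], 4))

def Spec_max_weight_independent_set (weights : List Int) (distances : List Int) (L : Int) (out : Int × List Int) : Prop := out = max_weight_independent_set_alt weights distances L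
instance (weights : List Int) (distances : List Int) (L : Int) (out : Int × List Int) : Decidable (Spec_max_weight_independent_set weights distances L out) := by unfold Spec_max_weight_independent_set; infer_instance

-- ===== CLAIM (what is proved, stated in full; the proofs are below) =====
def Claim_equal_max_weight_independent_set : Prop := ∀ (weights : List Int) (distances : List Int) (L : Int), Dom_max_weight_independent_set weights distances L → Pre_max_weight_independent_set weights distances L → Spec_max_weight_independent_set weights distances L (max_weight_independent_set weights distances L)

-- ===== LEMMAS AND PROOFS =====

-- spec prefix sum: sum of the first m of the first n-1 distances
def pvS (d : List Int) (n m : Nat) : Int := ((d.take (n - 1)).take m).sum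

-- the common inner loop, expressed against pvS
def pvStep (w d : List Int) (L : Int) (n : Nat) (f : List Int) (i : Nat) : Int × Nat :=
  (List.range i).foldl (fun (ba : Int × Nat) j =>
    if j = 0 ∨ L ≤ pvS d n (i - 1) - pvS d n (j - 1) then
      (if ba.1 < f.getD j 0 + w.getD (i - 1) 0 then (f.getD j 0 + w.getD (i - 1) 0, j) else ba)
    else ba) (0, 0)

-- the reference table: state (f, par) after k outer iterations (outer index i = k + 2)
def pvFP (w d : List Int) (L : Int) (n : Nat) : Nat → List Int × List Nat
  | 0 => ([0, w.getD 0 0], [0, 0])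
  | k + 1 =>
      let fp := pvFP w d L n k
      let ba := pvStep w d L n fp.1 (k + 2)
      (fp.1 ++ [ba.1], fp.2 ++ [ba.2])

-- descending chain from `last` following `par`
def pvDesc (par : List Nat) : Nat → Nat → List Int
  | 0, _ => []
  | fuel + 1, last => if last = 0 then [] else (last : Int) :: pvDesc par fuel (par.getD last 0)

theorem pvFP_len (w d : List Int) (L : Int) (n : Nat) (k : Nat) :
    (pvFP w d L n k).1.length = k + 2 ∧ (pvFP w d L n k).2.length = k + 2 := by
  induction k with
  | zero => simp [pvFP]
  | succ k ih => simp [pvFP, ih.1, ih.2]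


theorem pvTakeSum (l : List Int) (a : Nat) (h : a < l.length) :
    (l.take (a + 1)).sum = (l.take a).sum + l.getD a 0 := by
  rw [List.take_add_one, List.sum_append]
  have : l[a]? = some l[a] := List.getElem?_eq_getElem h
  simp [List.getD, this]


theorem pvFoldSum (l : List Int) : ∀ (b a : Nat) (s : Int), a + b ≤ l.length →
    (List.range' a b).foldl (fun s k => s + l.getD k 0) s
      = s + ((l.take (a + b)).sum - (l.take a).sum) := by
  intro b
  induction b with
  | zero => intro a s h; simp
  | succ b ih =>
    intro a s h
    rw [List.range'_succ, List.foldl_cons, ih (a+1) _ (by omega)]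
    have := pvTakeSum l a (by omega)
    have h2 : a + 1 + b = a + (b + 1) := by omega
    rw [h2] at *
    omega


-- A's gap re-summation equals the prefix-sum difference
theorem pvDist (w d : List Int) (hd : w.length ≤ d.length + 1) (i j : Nat)
    (hj : 1 ≤ j) (hji : j < i) (hin : i ≤ w.length) :
    (List.range' (j - 1) (i - j)).foldl (fun s k => s + d.getD k 0) 0
      = pvS d w.length (i - 1) - pvS d w.length (j - 1) := by
  have hb : (j - 1) + (i - j) = i - 1 := by omega
  have hlen : (j - 1) + (i - j) ≤ d.length := by omega
  rw [pvFoldSum d (i - j) (j - 1) 0 hlen, hb]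
  have t1 : pvS d w.length (i - 1) = (d.take (i - 1)).sum := by
    have hm : min (i - 1) (w.length - 1) = i - 1 := by omega
    unfold pvS; rw [List.take_take, hm]
  have t2 : pvS d w.length (j - 1) = (d.take (j - 1)).sum := by
    have hm : min (j - 1) (w.length - 1) = j - 1 := by omega
    unfold pvS; rw [List.take_take, hm]
  rw [t1, t2]; ring



def pvPsums (r : Int) : List Int → List Int
  | [] => []
  | x :: t => (r + x) :: pvPsums (r + x) t

theorem pvPrefAux (l : List Int) : ∀ (p : List Int) (r : Int),
    (l.foldl (fun (st : List Int × Int) x => (st.1 ++ [st.2 + x], st.2 + x)) (p, r)).1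
      = p ++ pvPsums r l := by
  induction l with
  | nil => intro p r; simp [pvPsums]
  | cons x t ih => intro p r; simp [pvPsums, ih]

theorem pvPsums_getD (l : List Int) : ∀ (r : Int) (m : Nat), m < l.length →
    (pvPsums r l).getD m 0 = r + (l.take (m + 1)).sum := by
  induction l with
  | nil => intro r m h; simp at h
  | cons x t ih =>
    intro r m h
    cases m with
    | zero => simp [pvPsums]
    | succ m =>
      show (pvPsums (r + x) t).getD m 0 = r + ((x :: t).take (m + 1 + 1)).sum
      rw [ih (r + x) m (by simpa using h), List.take_succ_cons, List.sum_cons]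
      ring

-- B's pref list computes pvS
theorem pvPref (w d : List Int) (hd : w.length ≤ d.length + 1) :
    ∀ m, m ≤ w.length - 1 →
    ((d.take (w.length - 1)).foldl
      (fun (st : List Int × Int) x => (st.1 ++ [st.2 + x], st.2 + x)) ([0], 0)).1.getD m 0
      = pvS d w.length m := by
  intro m hm
  have hlen : (d.take (w.length - 1)).length = w.length - 1 := by
    simp [List.length_take]; omega
  rw [pvPrefAux]
  cases m with
  | zero => simp [pvS]
  | succ k =>
    have hs : ([(0 : Int)] ++ pvPsums 0 (d.take (w.length - 1))).getD (k + 1) 0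
        = (pvPsums 0 (d.take (w.length - 1))).getD k 0 := by simp [List.getD]
    rw [hs, pvPsums_getD _ 0 k (by omega)]
    simp [pvS]


-- the inner-loop fold keeps its arg below i
theorem pvStep_arg_lt (w d : List Int) (L : Int) (n : Nat) (f : List Int) (i : Nat) (hi : 1 ≤ i) :
    (pvStep w d L n f i).2 < i := by
  have aux : ∀ (js : List Nat) (ba : Int × Nat), (∀ j ∈ js, j < i) → ba.2 < i →
      (js.foldl (fun (ba : Int × Nat) j =>
        if j = 0 ∨ L ≤ pvS d n (i - 1) - pvS d n (j - 1) then
          (if ba.1 < f.getD j 0 + w.getD (i - 1) 0 then (f.getD j 0 + w.getD (i - 1) 0, j) else ba)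
        else ba) ba).2 < i := by
    intro js
    induction js with
    | nil => intro ba _ hba; exact hba
    | cons j t ih =>
      intro ba hmem hba
      simp only [List.foldl_cons]
      apply ih _ (fun x hx => hmem x (List.mem_cons_of_mem _ hx))
      split_ifs with h1 h2
      · exact hmem j (List.mem_cons_self)
      · exact hba
      · exact hba
  exact aux (List.range i) (0, 0) (fun j hj => List.mem_range.mp hj) hi


theorem pvFP_par_lt (w d : List Int) (L : Int) (n : Nat) (k : Nat) :
    ∀ q, 1 ≤ q → (pvFP w d L n k).2.getD q 0 < q := by
  induction k with
  | zero =>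
    intro q hq
    rw [show (pvFP w d L n 0).2 = [0, 0] from rfl]
    have : ([0, 0] : List Nat).getD q 0 = 0 := by
      match q with | 0 => rfl | 1 => rfl | (n + 2) => simp [List.getD]
    omega
  | succ k ih =>
    intro q hq
    have hlen := (pvFP_len w d L n k).2
    show ((pvFP w d L n k).2 ++ [(pvStep w d L n (pvFP w d L n k).1 (k + 2)).2]).getD q 0 < q
    rcases Nat.lt_trichotomy q (k + 2) with h | h | h
    · rw [List.getD_append _ _ _ _ (by omega)]; exact ih q hq
    · rw [List.getD_append_right _ _ _ _ (by omega), h]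
      have := pvStep_arg_lt w d L n (pvFP w d L n k).1 (k + 2) (by omega)
      simpa [hlen] using this
    · rw [List.getD_eq_default]
      · omega
      · simp [hlen]; omega


theorem pvFP_f_zero (w d : List Int) (L : Int) (n : Nat) (k : Nat) :
    (pvFP w d L n k).1.getD 0 0 = 0 := by
  induction k with
  | zero => rfl
  | succ k ih =>
    have hlen := (pvFP_len w d L n k).1
    show ((pvFP w d L n k).1 ++ [(pvStep w d L n (pvFP w d L n k).1 (k + 2)).1]).getD 0 0 = 0
    rw [List.getD_append _ _ _ _ (by omega)]; exact ih



theorem pvUpdI_eq (f : Nat → Nat → Int) (a b : Nat) (v : Int) : pvUpdI f a b v a b = v := by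
  simp [pvUpdI]

theorem pvUpdI_ne (f : Nat → Nat → Int) (a b : Nat) (v : Int) (x y : Nat)
    (h : ¬(x = a ∧ y = b)) : pvUpdI f a b v x y = f x y := by
  simp only [pvUpdI, if_neg h]

theorem pvUpdN_eq (f : Nat → Nat → Nat) (a b : Nat) (v : Nat) : pvUpdN f a b v a b = v := by
  simp [pvUpdN]

theorem pvUpdN_ne (f : Nat → Nat → Nat) (a b : Nat) (v : Nat) (x y : Nat)
    (h : ¬(x = a ∧ y = b)) : pvUpdN f a b v x y = f x y := by
  simp only [pvUpdN, if_neg h]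

-- B's outer fold computes pvFP
theorem pvB_fold (w d : List Int) (L : Int) (hw : 1 ≤ w.length) (hd : w.length ≤ d.length + 1) :
    ∀ m, m ≤ w.length - 1 →
    (List.range' 2 m).foldl (fun (fp : List Int × List Nat) i =>
      let ba := (List.range i).foldl (fun (ba : Int × Nat) j =>
          if j = 0 ∨ L ≤ ((d.take (w.length - 1)).foldl
              (fun (st : List Int × Int) x => (st.1 ++ [st.2 + x], st.2 + x)) ([0], 0)).1.getD (i - 1) 0
              - ((d.take (w.length - 1)).foldl
              (fun (st : List Int × Int) x => (st.1 ++ [st.2 + x], st.2 + x)) ([0], 0)).1.getD (j - 1) 0 then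
            (if ba.1 < fp.1.getD j 0 + w.getD (i - 1) 0 then (fp.1.getD j 0 + w.getD (i - 1) 0, j) else ba)
          else ba) (0, 0)
      (fp.1 ++ [ba.1], fp.2 ++ [ba.2])) ([0, w.getD 0 0], [0, 0])
      = pvFP w d L w.length m := by
  intro m
  induction m with
  | zero => intro _; rfl
  | succ m ih =>
    intro hm
    rw [List.range'_1_concat, List.foldl_append, ih (by omega)]
    simp only [List.foldl_cons, List.foldl_nil]
    show (_, _) = pvFP w d L w.length (m + 1)
    have estep : (List.range (2 + m)).foldl (fun (ba : Int × Nat) j =>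
          if j = 0 ∨ L ≤ ((d.take (w.length - 1)).foldl
              (fun (st : List Int × Int) x => (st.1 ++ [st.2 + x], st.2 + x)) ([0], 0)).1.getD (2 + m - 1) 0
              - ((d.take (w.length - 1)).foldl
              (fun (st : List Int × Int) x => (st.1 ++ [st.2 + x], st.2 + x)) ([0], 0)).1.getD (j - 1) 0 then
            (if ba.1 < (pvFP w d L w.length m).1.getD j 0 + w.getD (2 + m - 1) 0 then
              ((pvFP w d L w.length m).1.getD j 0 + w.getD (2 + m - 1) 0, j) else ba)
          else ba) (0, 0)
        = pvStep w d L w.length (pvFP w d L w.length m).1 (m + 2) := by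
      have e2 : (2 : Nat) + m = m + 2 := by omega
      rw [e2]
      unfold pvStep
      apply PySem.List.foldl_congr_mem
      intro acc x hx
      have hx' : x < m + 2 := List.mem_range.mp hx
      rw [pvPref w d hd (m + 2 - 1) (by omega), pvPref w d hd (x - 1) (by omega)]
    rw [estep]
    rfl


-- A's inner loop: correspondence with pvStep's fold
theorem pvA_inner (w d : List Int) (L : Int) (hd : w.length ≤ d.length + 1)
    (i : Nat) (hi2 : 2 ≤ i) (hin : i ≤ w.length) (f : List Int) :
    ∀ (js : List Nat) (dp : Nat → Nat → Int) (prev : Nat → Nat → Nat) (ba : Int × Nat),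
    (∀ j ∈ js, j < i) →
    (∀ j, dp (i - 1) j = f.getD j 0) →
    dp i i = ba.1 → prev i i = ba.2 →
    (let st := js.foldl (fun (st : (Nat → Nat → Int) × (Nat → Nat → Nat)) j =>
        let dp := pvUpdI st.1 i j (st.1 (i - 1) j)
        let prev := pvUpdN st.2 i j j
        let can_include : Bool :=
          if 0 < j then
            !(decide ((List.range' (j - 1) (i - j)).foldl (fun s k => s + d.getD k 0) 0 < L))
          else true
        if can_include then
          let nw := dp (i - 1) j + w.getD (i - 1) 0
          if dp i i < nw then (pvUpdI dp i i nw, pvUpdN prev i i j) else (dp, prev)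
        else (dp, prev)) (dp, prev)
     let ba' := js.foldl (fun (ba : Int × Nat) j =>
        if j = 0 ∨ L ≤ pvS d w.length (i - 1) - pvS d w.length (j - 1) then
          (if ba.1 < f.getD j 0 + w.getD (i - 1) 0 then (f.getD j 0 + w.getD (i - 1) 0, j) else ba)
        else ba) ba
     st.1 i i = ba'.1 ∧ st.2 i i = ba'.2 ∧
     (∀ j ∈ js, st.1 i j = f.getD j 0) ∧
     (∀ j, j ∉ js → j ≠ i → st.1 i j = dp i j) ∧
     (∀ r j, r ≠ i → st.1 r j = dp r j ∧ st.2 r j = prev r j)) := by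
  intro js
  induction js with
  | nil =>
    intro dp prev ba hmem h1 hii hpp
    exact ⟨hii, hpp, by simp, fun j _ _ => rfl, fun r j _ => ⟨rfl, rfl⟩⟩
  | cons j t ih =>
    intro dp prev ba hmem h1 hii hpp
    have hji : j < i := hmem j List.mem_cons_self
    have hmem' : ∀ x ∈ t, x < i := fun x hx => hmem x (List.mem_cons_of_mem _ hx)
    simp only [List.foldl_cons]
    -- the always-performed writes of one A-iteration
    set dp1 := pvUpdI dp i j (dp (i - 1) j) with hdp1
    set prev1 := pvUpdN prev i j j with hprev1
    have e0 : dp (i - 1) j = f.getD j 0 := h1 j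
    have e1 : dp1 (i - 1) j = f.getD j 0 := by
      rw [hdp1, pvUpdI_ne _ _ _ _ _ _ (by omega), e0]
    have e2 : dp1 i i = ba.1 := by
      rw [hdp1, pvUpdI_ne _ _ _ _ _ _ (by omega), hii]
    have e3 : prev1 i i = ba.2 := by
      rw [hprev1, pvUpdN_ne _ _ _ _ _ _ (by omega), hpp]
    have e4 : ∀ j', dp1 (i - 1) j' = f.getD j' 0 := by
      intro j'; rw [hdp1, pvUpdI_ne _ _ _ _ _ _ (by omega)]; exact h1 j'
    -- the Bool test equals the spec condition
    have hcan : (if 0 < j then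
          !(decide ((List.range' (j - 1) (i - j)).foldl (fun s k => s + d.getD k 0) 0 < L))
        else true)
        = decide (j = 0 ∨ L ≤ pvS d w.length (i - 1) - pvS d w.length (j - 1)) := by
      by_cases hj0 : j = 0
      · simp [hj0]
      · rw [if_pos (by omega), pvDist w d hd i j (by omega) hji hin]
        simp only [hj0, false_or, ← decide_not, not_lt]
    by_cases hc : j = 0 ∨ L ≤ pvS d w.length (i - 1) - pvS d w.length (j - 1)
    · -- can_include
      by_cases hlt : ba.1 < f.getD j 0 + w.getD (i - 1) 0
      · -- improvement: A writes dp[i][i], prev[i][i]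
        rw [hcan]
        simp only [hc, decide_true, if_true, e1, e2]
        rw [if_pos hlt, if_pos hlt]
        obtain ⟨c1, c2, c3, c4, c5⟩ := ih (pvUpdI dp1 i i (f.getD j 0 + w.getD (i - 1) 0))
          (pvUpdN prev1 i i j) (f.getD j 0 + w.getD (i - 1) 0, j) hmem'
          (fun j' => by rw [pvUpdI_ne _ _ _ _ _ _ (by omega)]; exact e4 j')
          (pvUpdI_eq _ _ _ _) (pvUpdN_eq _ _ _ _)
        refine ⟨c1, c2, ?_, ?_, ?_⟩
        · intro x hx
          rcases List.mem_cons.mp hx with hx | hx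
          · subst hx
            by_cases hxt : x ∈ t
            · exact c3 x hxt
            · rw [c4 x hxt (by omega), pvUpdI_ne _ _ _ _ _ _ (by omega), hdp1, pvUpdI_eq, e0]
          · exact c3 x hx
        · intro x hx hxi
          have hxj : x ≠ j := fun hh => hx (hh ▸ List.mem_cons_self)
          have hxt : x ∉ t := fun hh => hx (List.mem_cons_of_mem _ hh)
          rw [c4 x hxt hxi, pvUpdI_ne _ _ _ _ _ _ (by omega), hdp1,
            pvUpdI_ne _ _ _ _ _ _ (by omega)]
        · intro r x hr
          obtain ⟨d1, d2⟩ := c5 r x hr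
          constructor
          · rw [d1, pvUpdI_ne _ _ _ _ _ _ (by omega), hdp1, pvUpdI_ne _ _ _ _ _ _ (by omega)]
          · rw [d2, pvUpdN_ne _ _ _ _ _ _ (by omega), hprev1, pvUpdN_ne _ _ _ _ _ _ (by omega)]
      · -- no improvement: A keeps (dp1, prev1)
        rw [hcan]
        simp only [hc, decide_true, if_true, e1, e2]
        rw [if_neg hlt, if_neg hlt]
        obtain ⟨c1, c2, c3, c4, c5⟩ := ih dp1 prev1 ba hmem' e4 e2 e3
        refine ⟨c1, c2, ?_, ?_, ?_⟩
        · intro x hx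
          rcases List.mem_cons.mp hx with hx | hx
          · subst hx
            by_cases hxt : x ∈ t
            · exact c3 x hxt
            · rw [c4 x hxt (by omega), hdp1, pvUpdI_eq, e0]
          · exact c3 x hx
        · intro x hx hxi
          have hxj : x ≠ j := fun hh => hx (hh ▸ List.mem_cons_self)
          have hxt : x ∉ t := fun hh => hx (List.mem_cons_of_mem _ hh)
          rw [c4 x hxt hxi, hdp1, pvUpdI_ne _ _ _ _ _ _ (by omega)]
        · intro r x hr
          obtain ⟨d1, d2⟩ := c5 r x hr
          constructor
          · rw [d1, hdp1, pvUpdI_ne _ _ _ _ _ _ (by omega)]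
          · rw [d2, hprev1, pvUpdN_ne _ _ _ _ _ _ (by omega)]
    · -- cannot include: A keeps (dp1, prev1), spec keeps ba
      rw [hcan]
      simp only [hc, decide_false, Bool.false_eq_true, if_false]
      obtain ⟨c1, c2, c3, c4, c5⟩ := ih dp1 prev1 ba hmem' e4 e2 e3
      refine ⟨c1, c2, ?_, ?_, ?_⟩
      · intro x hx
        rcases List.mem_cons.mp hx with hx | hx
        · subst hx
          by_cases hxt : x ∈ t
          · exact c3 x hxt
          · rw [c4 x hxt (by omega), hdp1, pvUpdI_eq, e0]
        · exact c3 x hx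
      · intro x hx hxi
        have hxj : x ≠ j := fun hh => hx (hh ▸ List.mem_cons_self)
        have hxt : x ∉ t := fun hh => hx (List.mem_cons_of_mem _ hh)
        rw [c4 x hxt hxi, hdp1, pvUpdI_ne _ _ _ _ _ _ (by omega)]
      · intro r x hr
        obtain ⟨d1, d2⟩ := c5 r x hr
        constructor
        · rw [d1, hdp1, pvUpdI_ne _ _ _ _ _ _ (by omega)]
        · rw [d2, hprev1, pvUpdN_ne _ _ _ _ _ _ (by omega)]


-- A's outer fold invariant
theorem pvA_fold (w d : List Int) (L : Int) (hw : 1 ≤ w.length) (hd : w.length ≤ d.length + 1) :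
    ∀ m, m ≤ w.length - 1 →
    (let st := (List.range' 2 m).foldl (fun st i =>
      (List.range i).foldl (fun (st : (Nat → Nat → Int) × (Nat → Nat → Nat)) j =>
        let dp := pvUpdI st.1 i j (st.1 (i - 1) j)
        let prev := pvUpdN st.2 i j j
        let can_include : Bool :=
          if 0 < j then
            !(decide ((List.range' (j - 1) (i - j)).foldl (fun s k => s + d.getD k 0) 0 < L))
          else true
        if can_include then
          let nw := dp (i - 1) j + w.getD (i - 1) 0
          if dp i i < nw then (pvUpdI dp i i nw, pvUpdN prev i i j) else (dp, prev)
        else (dp, prev)) st)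
      (pvUpdI (fun _ _ => 0) 1 1 (w.getD 0 0), (fun _ _ => 0 : Nat → Nat → Nat))
     (∀ j, st.1 (m + 1) j = (pvFP w d L w.length m).1.getD j 0) ∧
     (∀ r j, m + 2 ≤ r → st.1 r j = 0) ∧
     (∀ q, 1 ≤ q → q ≤ m + 1 → st.2 q q = (pvFP w d L w.length m).2.getD q 0) ∧
     (∀ q j, m + 2 ≤ q → st.2 q j = 0)) := by
  intro m
  induction m with
  | zero =>
    intro _
    refine ⟨?_, ?_, ?_, ?_⟩
    · intro j
      match j with
      | 0 => simp [pvUpdI, pvFP]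
      | 1 => simp [pvUpdI, pvFP]
      | (k + 2) => simp [pvUpdI, pvFP, List.getD]
    · intro r j hr
      show pvUpdI (fun _ _ => 0) 1 1 (w.getD 0 0) r j = 0
      rw [pvUpdI_ne _ _ _ _ _ _ (by omega)]
    · intro q h1 h2
      have : q = 1 := by omega
      subst this
      rfl
    · intro q j _
      rfl
  | succ m ih =>
    intro hm
    obtain ⟨i1, i2, i3, i4⟩ := ih (by omega)
    rw [List.range'_1_concat, List.foldl_append]
    simp only [List.foldl_cons, List.foldl_nil]
    rw [show (2 : Nat) + m = m + 2 from by omega]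
    simp only [show m + 1 + 1 = m + 2 from rfl]
    have hi2 : 2 ≤ m + 2 := by omega
    have hin : m + 2 ≤ w.length := by omega
    obtain ⟨c1, c2, c3, c4, c5⟩ := pvA_inner w d L hd (m + 2) hi2 hin (pvFP w d L w.length m).1
      (List.range (m + 2)) _ _ ((0 : Int), (0 : Nat))
      (fun j hj => List.mem_range.mp hj)
      (fun j => i1 j)
      (i2 (m + 2) (m + 2) (by omega))
      (i4 (m + 2) (m + 2) (by omega))
    have elen := (pvFP_len w d L w.length m).1
    have plen := (pvFP_len w d L w.length m).2
    have espec : (List.range (m + 2)).foldl (fun (ba : Int × Nat) j =>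
        if j = 0 ∨ L ≤ pvS d w.length (m + 2 - 1) - pvS d w.length (j - 1) then
          (if ba.1 < (pvFP w d L w.length m).1.getD j 0 + w.getD (m + 2 - 1) 0 then
            ((pvFP w d L w.length m).1.getD j 0 + w.getD (m + 2 - 1) 0, j) else ba)
        else ba) (0, 0) = pvStep w d L w.length (pvFP w d L w.length m).1 (m + 2) := rfl
    rw [espec] at c1 c2
    refine ⟨?_, ?_, ?_, ?_⟩
    · intro j
      show _ = ((pvFP w d L w.length m).1 ++ [(pvStep w d L w.length (pvFP w d L w.length m).1 (m + 2)).1]).getD j 0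
      rcases Nat.lt_trichotomy j (m + 2) with h | h | h
      · rw [List.getD_append _ _ _ _ (by omega)]
        exact c3 j (List.mem_range.mpr (by omega))
      · rw [List.getD_append_right _ _ _ _ (by omega), h]
        rw [show m + 2 - (pvFP w d L w.length m).1.length = 0 from by omega]
        exact c1
      · have hr : ((pvFP w d L w.length m).1
            ++ [(pvStep w d L w.length (pvFP w d L w.length m).1 (m + 2)).1]).getD j 0 = 0 :=
          List.getD_eq_default _ _ (by simp [elen]; omega)
        rw [hr]
        exact (c4 j (by simp [List.mem_range]; omega) (by omega)).trans (i2 (m + 2) j (by omega))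
    · intro r j hr
      exact ((c5 r j (by omega)).1).trans (i2 r j (by omega))
    · intro q h1 h2
      show _ = ((pvFP w d L w.length m).2 ++ [(pvStep w d L w.length (pvFP w d L w.length m).1 (m + 2)).2]).getD q 0
      rcases Nat.lt_or_ge q (m + 2) with h | h
      · rw [List.getD_append _ _ _ _ (by omega)]
        exact ((c5 q q (by omega)).2).trans (i3 q h1 (by omega))
      · have hq : q = m + 2 := by omega
        subst hq
        rw [List.getD_append_right _ _ _ _ (by omega)]
        rw [show m + 2 - (pvFP w d L w.length m).2.length = 0 from by omega]
        exact c2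
    · intro q j hq
      exact ((c5 q j (by omega)).2).trans (i4 q j (by omega))

theorem pvDesc_stable (par : List Nat) (hpar : ∀ m, 1 ≤ m → par.getD m 0 < m) :
    ∀ l f1 f2, l ≤ f1 → l ≤ f2 → pvDesc par f1 l = pvDesc par f2 l := by
  intro l
  induction l using Nat.strong_induction_on with
  | _ l ih =>
    intro f1 f2 h1 h2
    cases l with
    | zero => cases f1 <;> cases f2 <;> simp [pvDesc]
    | succ l' =>
      obtain ⟨g1, rfl⟩ : ∃ g, f1 = g + 1 := ⟨f1 - 1, by omega⟩
      obtain ⟨g2, rfl⟩ : ∃ g, f2 = g + 1 := ⟨f2 - 1, by omega⟩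
      have hlt := hpar (l' + 1) (by omega)
      simp only [pvDesc, if_neg (Nat.succ_ne_zero l')]
      exact congrArg _ (ih (par.getD (l' + 1) 0) (by omega) g1 g2 (by omega) (by omega))


theorem pvChainAux_desc (par : List Nat) :
    ∀ fuel last acc, pvChainAux par fuel last acc = acc ++ pvDesc par fuel last := by
  intro fuel
  induction fuel with
  | zero => intro last acc; simp [pvChainAux, pvDesc]
  | succ fuel ih =>
    intro last acc
    by_cases h : last = 0
    · simp [pvChainAux, pvDesc, h]
    · simp [pvChainAux, pvDesc, h, ih]


theorem pvA_rec (prev : Nat → Nat → Nat) (par : List Nat) (n : Nat)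
    (hdiag : ∀ q, 1 ≤ q → q ≤ n → prev q q = par.getD q 0)
    (hpar : ∀ m, 1 ≤ m → par.getD m 0 < m) :
    ∀ i, i ≤ n → ∀ (acc : List Int) (last : Nat), last ≤ i →
    ((List.range' 1 i).reverse.foldl (fun (st : List Int × Nat) m =>
        if m = st.2 then (st.1 ++ [(m : Int)], prev m st.2) else st) (acc, last)).1
      = acc ++ pvDesc par i last := by
  intro i
  induction i with
  | zero =>
    intro _ acc last hlast
    have : last = 0 := by omega
    simp [this, pvDesc]
  | succ i ih =>
    intro hin acc last hlast
    rw [List.range'_1_concat, List.reverse_append]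
    simp only [List.reverse_cons, List.reverse_nil, List.nil_append, List.singleton_append,
      List.foldl_cons]
    by_cases h : 1 + i = last
    · rw [if_pos h, h]
      have hl1 : 1 ≤ last := by omega
      have hln : last ≤ n := by omega
      have hp := hpar last hl1
      rw [hdiag last hl1 hln]
      rw [ih (by omega) (acc ++ [(last : Int)]) (par.getD last 0) (by omega)]
      have hd1 : pvDesc par (i + 1) last = (last : Int) :: pvDesc par i (par.getD last 0) := by
        rw [pvDesc, if_neg (by omega)]
      rw [hd1]
      simp
    · rw [if_neg h]
      rw [ih (by omega) acc last (by omega)]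
      exact congrArg _ (pvDesc_stable par hpar last i (i + 1) (by omega) (by omega))


theorem pvScan_bound (g : Nat → Int) (n : Nat) :
    ((List.range (n + 1)).foldl (fun (st : Int × Nat) j =>
      if st.1 < g j then (g j, j) else st) (0, 0)).2 ≤ n := by
  have aux : ∀ (js : List Nat) (st : Int × Nat), (∀ j ∈ js, j ≤ n) → st.2 ≤ n →
      ((js.foldl (fun (st : Int × Nat) j => if st.1 < g j then (g j, j) else st) st)).2 ≤ n := by
    intro js
    induction js with
    | nil => exact fun st _ h => h
    | cons j t ih =>
      intro st hm hst
      simp only [List.foldl_cons]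
      apply ih _ (fun x hx => hm x (List.mem_cons_of_mem _ hx))
      split_ifs
      · exact hm j List.mem_cons_self
      · exact hst
  exact aux _ _ (fun j hj => by have := List.mem_range.mp hj; omega) (by omega)



-- closed names for the two ports' main folds (proof-side abbreviations; defeq to the ports)
def pvAst (w d : List Int) (L : Int) : (Nat → Nat → Int) × (Nat → Nat → Nat) :=
  (List.range' 2 (w.length - 1)).foldl (fun st i =>
      (List.range i).foldl (fun (st : (Nat → Nat → Int) × (Nat → Nat → Nat)) j =>
        let dp := pvUpdI st.1 i j (st.1 (i - 1) j)
        let prev := pvUpdN st.2 i j j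
        let can_include : Bool :=
          if 0 < j then
            !(decide ((List.range' (j - 1) (i - j)).foldl (fun s k => s + d.getD k 0) 0 < L))
          else true
        if can_include then
          let nw := dp (i - 1) j + w.getD (i - 1) 0
          if dp i i < nw then (pvUpdI dp i i nw, pvUpdN prev i i j) else (dp, prev)
        else (dp, prev)) st)
    (pvUpdI (fun _ _ => 0) 1 1 (w.getD 0 0), (fun _ _ => 0 : Nat → Nat → Nat))

def pvBfp (w d : List Int) (L : Int) : List Int × List Nat :=
  (List.range' 2 (w.length - 1)).foldl (fun (fp : List Int × List Nat) i =>
      let ba := (List.range i).foldl (fun (ba : Int × Nat) j =>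
          if j = 0 ∨ L ≤ ((d.take (w.length - 1)).foldl
              (fun (st : List Int × Int) x => (st.1 ++ [st.2 + x], st.2 + x)) ([0], 0)).1.getD (i - 1) 0
              - ((d.take (w.length - 1)).foldl
              (fun (st : List Int × Int) x => (st.1 ++ [st.2 + x], st.2 + x)) ([0], 0)).1.getD (j - 1) 0 then
            (if ba.1 < fp.1.getD j 0 + w.getD (i - 1) 0 then (fp.1.getD j 0 + w.getD (i - 1) 0, j) else ba)
          else ba) (0, 0)
      (fp.1 ++ [ba.1], fp.2 ++ [ba.2]))
    (if 1 ≤ w.length then ([0, w.getD 0 0], [0, 0]) else ([0], [0]))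

-- ===== VERDICT (by name: the statement is the Claim_ definition above) =====
theorem max_weight_independent_set_spec : Claim_equal_max_weight_independent_set := by
  intro w d L hdom hpre
  obtain ⟨hw, hd⟩ := hpre
  unfold Spec_max_weight_independent_set
  have hA : max_weight_independent_set w d L =
      (((List.range (w.length + 1)).foldl (fun (st : Int × Nat) j =>
          if st.1 < (pvAst w d L).1 w.length j then ((pvAst w d L).1 w.length j, j) else st) (0, 0)).1,
       ((List.range' 1 w.length).reverse.foldl (fun (st : List Int × Nat) i =>
          if i = st.2 then (st.1 ++ [(i : Int)], (pvAst w d L).2 i st.2) else st)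
          ([], ((List.range (w.length + 1)).foldl (fun (st : Int × Nat) j =>
            if st.1 < (pvAst w d L).1 w.length j then ((pvAst w d L).1 w.length j, j) else st) (0, 0)).2)).1.reverse) := rfl
  have hB : max_weight_independent_set_alt w d L =
      (((List.range' 1 w.length).foldl (fun (st : Int × Nat) j =>
          if st.1 < (pvBfp w d L).1.getD j 0 then ((pvBfp w d L).1.getD j 0, j) else st) (0, 0)).1,
       (pvChainAux (pvBfp w d L).2 (w.length + 1)
          ((List.range' 1 w.length).foldl (fun (st : Int × Nat) j =>
            if st.1 < (pvBfp w d L).1.getD j 0 then ((pvBfp w d L).1.getD j 0, j) else st) (0, 0)).2 []).reverse) := rfl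
  rw [hA, hB]
  have hfp : pvBfp w d L = pvFP w d L w.length (w.length - 1) := by
    unfold pvBfp
    rw [if_pos hw]
    exact pvB_fold w d L hw hd (w.length - 1) le_rfl
  rw [hfp]
  have e1 : w.length - 1 + 1 = w.length := by omega
  obtain ⟨a1', a2', a3', a4'⟩ := pvA_fold w d L hw hd (w.length - 1) le_rfl
  simp only [e1] at a1' a3'
  have a1 : ∀ j, (pvAst w d L).1 w.length j
      = (pvFP w d L w.length (w.length - 1)).1.getD j 0 := a1'
  have a3 : ∀ q, 1 ≤ q → q ≤ w.length → (pvAst w d L).2 q q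
      = (pvFP w d L w.length (w.length - 1)).2.getD q 0 := a3'
  have hpar : ∀ m, 1 ≤ m → (pvFP w d L w.length (w.length - 1)).2.getD m 0 < m :=
    pvFP_par_lt w d L w.length (w.length - 1)
  have hscan : (List.range (w.length + 1)).foldl (fun (st : Int × Nat) j =>
        if st.1 < (pvAst w d L).1 w.length j then ((pvAst w d L).1 w.length j, j) else st) (0, 0)
      = (List.range' 1 w.length).foldl (fun (st : Int × Nat) j =>
        if st.1 < (pvFP w d L w.length (w.length - 1)).1.getD j 0
        then ((pvFP w d L w.length (w.length - 1)).1.getD j 0, j) else st) (0, 0) := by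
    rw [List.range_eq_range', List.range'_succ]
    simp only [List.foldl_cons]
    rw [a1 0, pvFP_f_zero]
    rw [if_neg (lt_irrefl (0 : Int))]
    exact PySem.List.foldl_congr_mem _ _ _ _ (fun acc x _ => by rw [a1 x])
  rw [hscan]
  have hb := pvScan_bound ((pvAst w d L).1 w.length) w.length
  rw [hscan] at hb
  have hrec := pvA_rec (pvAst w d L).2 (pvFP w d L w.length (w.length - 1)).2 w.length a3 hpar
    w.length le_rfl []
    ((List.range' 1 w.length).foldl (fun (st : Int × Nat) j =>
      if st.1 < (pvFP w d L w.length (w.length - 1)).1.getD j 0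
      then ((pvFP w d L w.length (w.length - 1)).1.getD j 0, j) else st) (0, 0)).2 hb
  rw [hrec, pvChainAux_desc]
  rw [pvDesc_stable (pvFP w d L w.length (w.length - 1)).2 hpar _ (w.length + 1) w.length
    (by omega) (by omega)]
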